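-- pv_equiv track=rewrite | github.com/daniel-reich/ubiquitous-fiesta | Fx7hyoNTZNMGzc3uj_4.py | number_len_sort
-- ===== SOURCE A (Python) =====
-- def number_len_sort(lst):
--   n = []
--   count = 1
--
--   while len(n) != len(lst):
--     for i in lst:
--       if len(str(i)) == count:
--         n.append(i)
--     count += 1
--
--   return n
-- ===== SOURCE B (Python) =====
-- def number_len_sort(lst):
--   buckets = {}
--   for x in lst:
--     buckets.setdefault(len(str(x)), []).append(x)
--   out = []
--   for k in sorted(buckets):
--     out += buckets[k]
--   return out
-- ===== Notes on version B (the rewrite author's own statement) =====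
-- stated objective: faster
-- what changed: A repeatedly rescans the whole list once per digit-length value until everything is placed; B makes a single grouping pass into a dict of digit-length buckets and then concatenates the buckets in sorted key order.
import Mathlib
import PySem

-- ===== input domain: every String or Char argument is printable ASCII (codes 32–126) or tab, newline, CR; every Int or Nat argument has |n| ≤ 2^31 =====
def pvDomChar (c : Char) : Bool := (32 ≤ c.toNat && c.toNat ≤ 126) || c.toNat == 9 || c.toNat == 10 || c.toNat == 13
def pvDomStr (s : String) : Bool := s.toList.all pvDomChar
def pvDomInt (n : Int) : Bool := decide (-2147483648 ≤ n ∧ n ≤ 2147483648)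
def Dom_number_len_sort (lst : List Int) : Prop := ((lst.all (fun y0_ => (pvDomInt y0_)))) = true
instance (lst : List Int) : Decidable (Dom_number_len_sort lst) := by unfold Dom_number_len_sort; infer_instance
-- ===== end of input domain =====

-- B replaces A's repeated whole-list sweeps (one sweep per digit-length value) with a single
-- grouping pass into length buckets plus one concatenation over the sorted bucket keys.

-- ===== PORT A =====
-- len(str(i))
def pvStrLen (i : Int) : Nat := (PySem.Int.toChars i).length

-- A's while-loop; the fuel argument is only a totality guard: the maximal digit length of
-- an element bounds the number of sweeps after which the loop condition must fail.
def pvLoopA (lst : List Int) : Nat → List Int → Nat → List Int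
  | 0, n, _ => n
  | fuel + 1, n, count =>
    if n.length ≠ lst.length then
      pvLoopA lst fuel (n ++ lst.filter (fun i => pvStrLen i == count)) (count + 1)
    else n

def number_len_sort (lst : List Int) : List Int :=
  pvLoopA lst (lst.foldl (fun m i => max m (pvStrLen i)) 0) [] 1

-- ===== PORT B =====
-- buckets.setdefault(len(str(x)), []).append(x)  ==  modify key [] (· ++ [x])
def pvBuckets (lst : List Int) : PySem.Dict Nat (List Int) :=
  lst.foldl (fun d x => d.modify (pvStrLen x) [] (fun b => b ++ [x])) PySem.Dict.empty

-- for k in sorted(buckets): out += buckets[k]   (k is always a key, so buckets[k] = getD k [])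
def number_len_sort_alt (lst : List Int) : List Int :=
  (PySem.List.sorted (pvBuckets lst).keys (fun k => k) false).foldl
    (fun out k => out ++ (pvBuckets lst).getD k []) []

-- ===== PRECONDITION & SPEC =====
def Spec_number_len_sort (lst : List Int) (out : List Int) : Prop := out = number_len_sort_alt lst
instance (lst : List Int) (out : List Int) : Decidable (Spec_number_len_sort lst out) := by unfold Spec_number_len_sort; infer_instance

-- ===== CLAIM (what is proved, stated in full; the proofs are below) =====
def Claim_equal_number_len_sort : Prop := ∀ (lst : List Int), Dom_number_len_sort lst → Spec_number_len_sort lst (number_len_sort lst)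

-- ===== LEMMAS AND PROOFS =====

-- the per-digit-length slice of lst both programs assemble
def pvFL (lst : List Int) (c : Nat) : List Int := lst.filter (fun i => pvStrLen i == c)

lemma pvToDigitsCore_len (b f n : Nat) (acc : List Char) :
    acc.length ≤ (Nat.toDigitsCore b f n acc).length := by
  induction f generalizing n acc with
  | zero => simp [Nat.toDigitsCore]
  | succ f ih =>
    simp only [Nat.toDigitsCore]
    split
    · simp
    · calc acc.length ≤ (Nat.digitChar (n % b) :: acc).length := by simp
        _ ≤ _ := ih _ _

lemma pvStrLen_pos (i : Int) : 1 ≤ pvStrLen i := by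
  unfold pvStrLen PySem.Int.toChars
  split
  · simp
  · unfold Nat.toDigits
    simp only [Nat.toDigitsCore]
    split
    · simp
    · calc 1 = ([Nat.digitChar (i.toNat % 10)] : List Char).length := by simp
        _ ≤ _ := pvToDigitsCore_len _ _ _ _

-- A's loop characterised: as long as the remaining slices account for the missing elements,
-- the loop returns the accumulator followed by the slices for counts count, count+1, …
lemma pvLoopA_eq (lst : List Int) (fuel : Nat) :
    ∀ (count : Nat) (n : List Int),
      n.length + ((List.range' count fuel).flatMap (pvFL lst)).length = lst.length →
      pvLoopA lst fuel n count = n ++ (List.range' count fuel).flatMap (pvFL lst) := by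
  induction fuel with
  | zero => intro count n h; simp [pvLoopA]
  | succ fuel ih =>
    intro count n h
    rw [List.range'_succ] at h ⊢
    simp only [List.flatMap_cons] at h ⊢
    by_cases hl : n.length = lst.length
    · have h0 : (pvFL lst count ++ (List.range' (count + 1) fuel).flatMap (pvFL lst)) = [] := by
        rw [← List.length_eq_zero_iff]; omega
      simp [pvLoopA, hl, h0]
    · simp only [pvLoopA, if_pos (by exact hl)]
      have h' : (n ++ lst.filter (fun i => pvStrLen i == count)).length
          + ((List.range' (count + 1) fuel).flatMap (pvFL lst)).length = lst.length := by
        simp only [List.length_append, pvFL] at h ⊢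
        omega
      rw [ih _ _ h']
      simp [pvFL, List.append_assoc]

lemma pvSumIte (k : Nat) (L : List Nat) (hnd : L.Nodup) (hm : k ∈ L) :
    (L.map (fun c => if k = c then 1 else 0)).sum = 1 := by
  induction L with
  | nil => simp at hm
  | cons c t ih =>
    rcases List.mem_cons.mp hm with h | h
    · subst h
      have hne : ∀ x ∈ t, k ≠ x := by
        intro x hx he
        exact (List.nodup_cons.mp hnd).1 (he ▸ hx)
      have hz : (t.map (fun c => if k = c then 1 else 0)).sum = 0 := by
        apply List.sum_eq_zero
        intro x hx
        rcases List.mem_map.mp hx with ⟨y, hy, rfl⟩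
        simp [hne y hy]
      simp [hz]
    · have hk : k ≠ c := fun he => (List.nodup_cons.mp hnd).1 (he ▸ h)
      simp [hk, ih (List.nodup_cons.mp hnd).2 h]

-- total length of the slices over a nodup list of lengths covering lst
lemma pvCover (lst : List Int) (L : List Nat) (hnd : L.Nodup)
    (hcov : ∀ i ∈ lst, pvStrLen i ∈ L) :
    ((L.flatMap (pvFL lst)).length = lst.length) := by
  induction lst with
  | nil => simp [pvFL]
  | cons x xs ih =>
    have hx : pvStrLen x ∈ L := hcov x (by simp)
    have hxs : ∀ i ∈ xs, pvStrLen i ∈ L := fun i hi => hcov i (by simp [hi])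
    have hfl : ∀ c, (pvFL (x :: xs) c).length
        = (if pvStrLen x = c then 1 else 0) + (pvFL xs c).length := by
      intro c
      simp only [pvFL, List.filter_cons]
      split <;> rename_i h <;> simp_all <;> omega
    calc (L.flatMap (pvFL (x :: xs))).length
        = (L.map (fun c => (pvFL (x :: xs) c).length)).sum := by
          simp [List.length_flatMap]
      _ = (L.map (fun c => (if pvStrLen x = c then 1 else 0) + (pvFL xs c).length)).sum := by
          simp only [hfl]
      _ = (L.map (fun c => if pvStrLen x = c then 1 else 0)).sum
            + (L.map (fun c => (pvFL xs c).length)).sum := List.sum_map_add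
      _ = 1 + xs.length := by
          rw [pvSumIte _ _ hnd hx]
          simp [← List.length_flatMap, ih hxs]
      _ = (x :: xs).length := by simp [Nat.add_comm]

lemma pvBuckets_getD (lst : List Int) (c : Nat) :
    (pvBuckets lst).getD c [] = pvFL lst c := by
  unfold pvBuckets
  have hmap := List.foldl_map (f := fun x : Int => (pvStrLen x, x))
    (g := fun (d : PySem.Dict Nat (List Int)) (p : Nat × Int) => d.modify p.1 [] (fun b => b ++ [p.2]))
    (l := lst) (init := PySem.Dict.empty)
  rw [show (lst.foldl (fun d x => d.modify (pvStrLen x) [] (fun b => b ++ [x])) PySem.Dict.empty)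
      = ((lst.map (fun x => (pvStrLen x, x))).foldl (fun d p => d.modify p.1 [] (fun b => b ++ [p.2])) PySem.Dict.empty) from hmap.symm]
  rw [PySem.Dict.getD_foldl_modify_append]
  simp [pvFL, List.filter_map, Function.comp_def]

lemma pvBuckets_keys (lst : List Int) :
    (pvBuckets lst).keys = PySem.Set.ofList (lst.map pvStrLen) := by
  unfold pvBuckets
  rw [PySem.Dict.keys_foldl_modify_key lst pvStrLen [] (fun _ x => (fun b => b ++ [x]))]
  simp [PySem.Set.update_nil_left, PySem.Dict.keys_empty]

-- dropping the length values whose slice is empty changes nothing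
lemma pvDropEmpty (lst : List Int) (L : List Nat) :
    L.flatMap (pvFL lst) = (L.filter (fun c => !(pvFL lst c).isEmpty)).flatMap (pvFL lst) := by
  induction L with
  | nil => simp
  | cons c t ih =>
    by_cases h : (pvFL lst c).isEmpty
    · simp [List.filter_cons, h, List.isEmpty_iff.mp h, ih]
    · simp [List.filter_cons, h, ih]

-- two strictly increasing lists of lengths both containing every inhabited length agree
-- once restricted to the inhabited lengths
lemma pvFilter_eq (lst : List Int) (L M : List Nat)
    (hL : L.Pairwise (·<·)) (hM : M.Pairwise (·<·))
    (hLc : ∀ c, (pvFL lst c) ≠ [] → c ∈ L) (hMc : ∀ c, (pvFL lst c) ≠ [] → c ∈ M) :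
    L.filter (fun c => !(pvFL lst c).isEmpty) = M.filter (fun c => !(pvFL lst c).isEmpty) := by
  have hL' := List.Pairwise.filter (fun c => !(pvFL lst c).isEmpty) hL
  have hM' := List.Pairwise.filter (fun c => !(pvFL lst c).isEmpty) hM
  have hnd : ∀ {K : List Nat}, K.Pairwise (·<·) → K.Nodup :=
    fun h => h.imp (fun hlt => Nat.ne_of_lt hlt)
  refine (List.perm_ext_iff_of_nodup (hnd hL') (hnd hM')).mpr ?_ |>.eq_of_pairwise (by omega) hL' hM'
  intro c
  simp only [List.mem_filter, Bool.not_eq_eq_eq_not]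
  constructor
  · rintro ⟨_, hne⟩; exact ⟨hMc c (by simpa using hne), hne⟩
  · rintro ⟨_, hne⟩; exact ⟨hLc c (by simpa using hne), hne⟩

lemma pvMain (lst : List Int) : number_len_sort lst = number_len_sort_alt lst := by
  set maxFuel := lst.foldl (fun m i => max m (pvStrLen i)) 0 with hmf
  set R := List.range' 1 maxFuel with hR
  set M := PySem.List.sorted (pvBuckets lst).keys (fun k => k) false with hM
  have hfold : maxFuel = (lst.map pvStrLen).foldl max 0 := by
    rw [hmf, List.foldl_map (f := pvStrLen) (g := fun m k => max m k) (l := lst) (init := 0)]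
  have hub : ∀ i ∈ lst, pvStrLen i ≤ maxFuel := by
    intro i hi
    rw [hfold]
    exact (PySem.List.le_foldl_max (lst.map pvStrLen) 0).2 _ (List.mem_map_of_mem hi)
  have hcovR : ∀ i ∈ lst, pvStrLen i ∈ R := by
    intro i hi
    rw [hR, List.mem_range'_1]
    exact ⟨pvStrLen_pos i, by have := hub i hi; omega⟩
  have hRpw : R.Pairwise (·<·) := by
    rw [hR]; have := List.pairwise_lt_range' (s := 1) (n := maxFuel) (step := 1); simpa using this
  have hMpw : M.Pairwise (·<·) := by
    rw [hM, pvBuckets_keys]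
    exact PySem.List.sorted_ofList_pairwise_lt (lst.map pvStrLen)
  have hmemfl : ∀ c, pvFL lst c ≠ [] → ∃ i ∈ lst, pvStrLen i = c := by
    intro c hne
    rcases List.exists_mem_of_ne_nil _ hne with ⟨x, hx⟩
    have := List.mem_filter.mp hx
    exact ⟨x, this.1, by simpa using this.2⟩
  have hcM : ∀ c, pvFL lst c ≠ [] → c ∈ M := by
    intro c hne
    rcases hmemfl c hne with ⟨i, hi, rfl⟩
    rw [hM, PySem.List.mem_sorted, pvBuckets_keys, PySem.Set.mem_ofList]
    exact List.mem_map_of_mem hi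
  have hcR : ∀ c, pvFL lst c ≠ [] → c ∈ R := by
    intro c hne
    rcases hmemfl c hne with ⟨i, hi, rfl⟩
    exact hcovR i hi
  have hA : number_len_sort lst = R.flatMap (pvFL lst) := by
    have := pvLoopA_eq lst maxFuel 1 []
      (by simpa using pvCover lst R (hRpw.imp (fun hlt => Nat.ne_of_lt hlt)) hcovR)
    simpa [number_len_sort] using this
  have hB : number_len_sort_alt lst = M.flatMap (pvFL lst) := by
    rw [number_len_sort_alt, ← hM, PySem.List.foldl_append_eq_flatMap]
    simp only [List.nil_append]
    exact List.flatMap_congr (fun c _ => pvBuckets_getD lst c)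
  rw [hA, hB, pvDropEmpty lst R, pvDropEmpty lst M,
    pvFilter_eq lst R M hRpw hMpw hcR hcM]

-- ===== VERDICT (by name: the statement is the Claim_ definition above) =====
theorem number_len_sort_spec : Claim_equal_number_len_sort := by
  intro lst _
  unfold Spec_number_len_sort
  exact pvMain lst
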